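-- pv_equiv track=rewrite | github.com/bssrdf/pyleet | G/GridGame.py | gridGame2
-- ===== SOURCE A (Python) =====
-- from typing import List
--
-- def gridGame2(grid: List[List[int]]) -> int:
--     n = len(grid[0])
--     upper = sum(grid[0])
--     r2 = (10**5+1)*n
--     r1Sum, r2Sum = 0, 0
--     for j in range(n):
--         r1Sum += grid[0][j]
--         tmp = max(upper - r1Sum, r2Sum)
--         r2Sum += grid[1][j]
--         if r2 > tmp:
--             r2 = tmp
--     return r2
-- ===== SOURCE B (Python) =====
-- def gridGame2(grid):
--     # divide and conquer over split points: each node carries the row-0 sum to the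
--     # right of its range and the row-1 sum to its left, so no prefix arrays and no
--     # left-to-right running scan are needed
--     row0 = grid[0]
--     n = len(row0)
--     ans0 = (10**5 + 1) * n
--     if n == 0:
--         return ans0
--     row1 = grid[1]
--
--     def solve(lo, hi, top, bottom):
--         # min over split points j in [lo, hi) of
--         #   max(sum(row0[j+1:]), sum(row1[:j]))
--         # given top == sum(row0[hi:]) and bottom == sum(row1[:lo])
--         if hi - lo == 1:
--             return max(top, bottom)
--         mid = (lo + hi) // 2
--         left = solve(lo, mid, top + sum(row0[mid:hi]), bottom)
--         right = solve(mid, hi, top, bottom + sum(row1[lo:mid]))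
--         return min(left, right)
--
--     return min(ans0, solve(0, n, 0, 0))
-- ===== Notes on version B (the rewrite author's own statement) =====
-- stated objective: alternative
-- what changed: Replaces A's single left-to-right scan with running scalars by a divide-and-conquer recursion over split points: each node passes down the row-0 sum right of its range and the row-1 sum left of it (recomputing half-range sums by slicing), and combines children with min.
import Mathlib
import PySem

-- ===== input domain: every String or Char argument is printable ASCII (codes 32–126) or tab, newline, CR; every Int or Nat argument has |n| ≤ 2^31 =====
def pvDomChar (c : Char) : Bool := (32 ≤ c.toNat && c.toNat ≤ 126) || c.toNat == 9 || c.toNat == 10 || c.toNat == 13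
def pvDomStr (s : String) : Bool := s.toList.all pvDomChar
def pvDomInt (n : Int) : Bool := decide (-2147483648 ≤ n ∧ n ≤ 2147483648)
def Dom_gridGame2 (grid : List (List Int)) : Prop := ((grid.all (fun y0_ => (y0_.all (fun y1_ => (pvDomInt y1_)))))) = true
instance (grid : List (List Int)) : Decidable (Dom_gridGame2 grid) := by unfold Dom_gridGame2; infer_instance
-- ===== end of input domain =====

-- B replaces A's single left-to-right scan with running scalars by a divide-and-conquer
-- recursion over split points (objective: alternative decomposition).

-- ===== PORT A =====
-- loop body of A's single pass, state = (r2, r1Sum, r2Sum)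
def pvStepA (upper : Int) (row0 row1 : List Int) (st : Int × Int × Int) (j : Int) : Int × Int × Int :=
  let r1Sum := st.2.1 + (PySem.List.pyGet? row0 j).getD 0
  let tmp := max (upper - r1Sum) st.2.2
  let r2Sum := st.2.2 + (PySem.List.pyGet? row1 j).getD 0
  ((if st.1 > tmp then tmp else st.1), r1Sum, r2Sum)

def gridGame2 (grid : List (List Int)) : Int :=
  let row0 := (PySem.List.pyGet? grid 0).getD []
  let n : Int := row0.length
  let upper := row0.foldl (· + ·) 0
  let row1 := (PySem.List.pyGet? grid 1).getD []
  ((PySem.List.pyRange 0 n 1).foldl (pvStepA upper row0 row1) (100001 * n, 0, 0)).1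

-- ===== PORT B =====
-- Source B's inner 'solve(lo, hi, top, bottom)': divide and conquer over split points.
-- The fuel argument only makes the recursion structural (kernel-reducible); it is
-- hi - lo at the top call, an upper bound on the recursion depth, so it never runs out
-- on the calls Python makes (Python's solve is only invoked with lo < hi).
def pvSolve (row0 row1 : List Int) : Nat → Int → Int → Int → Int → Int
  | 0, _, _, _, _ => 0
  | fuel + 1, lo, hi, top, bottom =>
    if hi - lo = 1 then max top bottom
    else
      let mid := PySem.Int.floordiv (lo + hi) 2
      min (pvSolve row0 row1 fuel lo mid
            (top + (PySem.List.slice row0 (some mid) (some hi)).foldl (· + ·) 0) bottom)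
          (pvSolve row0 row1 fuel mid hi top
            (bottom + (PySem.List.slice row1 (some lo) (some mid)).foldl (· + ·) 0))

def gridGame2_alt (grid : List (List Int)) : Int :=
  let row0 := (PySem.List.pyGet? grid 0).getD []
  let n : Int := row0.length
  let ans0 := 100001 * n
  if n = 0 then ans0
  else
    let row1 := (PySem.List.pyGet? grid 1).getD []
    min ans0 (pvSolve row0 row1 n.toNat 0 n 0 0)

-- ===== PRECONDITION & SPEC =====
-- Pre_ excludes exactly the inputs on which A raises IndexError: the empty grid, and a
-- nonempty first row without a second row of at least that length.
def Pre_gridGame2 (grid : List (List Int)) : Prop :=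
  grid ≠ [] ∧ ((grid.headD []).length ≠ 0 →
    2 ≤ grid.length ∧ (grid.headD []).length ≤ ((grid.drop 1).headD []).length)
instance (grid : List (List Int)) : Decidable (Pre_gridGame2 grid) := by
  unfold Pre_gridGame2; infer_instance

def pvWitness_gridGame2 : List (List Int) := [[2, 5, 4], [1, 5, 1]]

def Spec_gridGame2 (grid : List (List Int)) (out : Int) : Prop := out = gridGame2_alt grid
instance (grid : List (List Int)) (out : Int) : Decidable (Spec_gridGame2 grid out) := by unfold Spec_gridGame2; infer_instance

-- ===== CLAIM (what is proved, stated in full; the proofs are below) =====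
def Claim_equal_gridGame2 : Prop := ∀ (grid : List (List Int)), Dom_gridGame2 grid → Pre_gridGame2 grid → Spec_gridGame2 grid (gridGame2 grid)

-- ===== LEMMAS AND PROOFS =====

-- prefix sum of the first k elements
def pvPref (xs : List Int) (k : Nat) : Int := (xs.take k).foldl (· + ·) 0

-- the value A's loop holds after k iterations
def pvAns (upper : Int) (row0 row1 : List Int) (n : Int) : Nat → Int
  | 0 => 100001 * n
  | k + 1 => min (pvAns upper row0 row1 n k)
                 (max (upper - pvPref row0 (k + 1)) (pvPref row1 k))

-- the split-point candidate at index j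
def pvCandN (upper : Int) (row0 row1 : List Int) (j : Nat) : Int :=
  max (upper - pvPref row0 (j + 1)) (pvPref row1 j)

-- the candidates for split points lo, lo+1, …, lo+len-1
def pvCands (upper : Int) (row0 row1 : List Int) (lo len : Nat) : List Int :=
  (List.range' lo len).map (pvCandN upper row0 row1)

theorem pvPref_succ (xs : List Int) (k : Nat) (hk : k < xs.length) :
    pvPref xs (k + 1) = pvPref xs k + (xs[k]?).getD 0 := by
  unfold pvPref
  rw [List.take_add_one, List.getElem?_eq_getElem hk]
  rw [List.foldl_append]
  rfl

theorem loopA (upper : Int) (row0 row1 : List Int) (n : Int) :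
    ∀ (k : Nat), k ≤ row0.length → k ≤ row1.length →
    (PySem.List.pyRange 0 (k : Int) 1).foldl (pvStepA upper row0 row1) (100001 * n, 0, 0)
      = (pvAns upper row0 row1 n k, pvPref row0 k, pvPref row1 k) := by
  intro k
  induction k with
  | zero => intro _ _; simp [PySem.List.pyRange_one_eq_nil, pvAns, pvPref]
  | succ k ih =>
      intro h0 h1
      have hr : PySem.List.pyRange 0 ((k + 1 : Nat) : Int) 1
          = PySem.List.pyRange 0 (k : Int) 1 ++ [(k : Int)] := by
        push_cast
        exact PySem.List.pyRange_one_succ_right (by positivity)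
      rw [hr, List.foldl_append, ih (by omega) (by omega)]
      have g0 : (PySem.List.pyGet? row0 (k : Int)).getD 0 = (row0[k]?).getD 0 := by
        rw [PySem.List.pyGet?_natCast]
      have g1 : (PySem.List.pyGet? row1 (k : Int)).getD 0 = (row1[k]?).getD 0 := by
        rw [PySem.List.pyGet?_natCast]
      simp only [List.foldl_cons, List.foldl_nil, pvStepA, g0, g1]
      rw [← pvPref_succ row0 k (by omega), ← pvPref_succ row1 k (by omega)]
      simp only [pvAns, Prod.mk.injEq, and_true, min_def, max_def]
      split_ifs <;> omega

-- foldl min pulls a min out of its accumulator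
theorem pullMin (l : List Int) : ∀ (p q : Int),
    l.foldl min (min p q) = min p (l.foldl min q) := by
  induction l with
  | nil => intro p q; rfl
  | cons x t ih =>
      intro p q
      simp only [List.foldl_cons]
      rw [show min (min p q) x = min p (min q x) by omega, ih]

-- foldl min over a list split at one element
theorem foldlMin_split (l1 l2 : List Int) (a x : Int) :
    (l1 ++ x :: l2).foldl min a = min (l1.foldl min a) (l2.foldl min x) := by
  rw [List.foldl_append, List.foldl_cons, pullMin]

-- shifting the accumulator of a foldl-sum
theorem sumShift (l : List Int) : ∀ (s : Int), l.foldl (· + ·) s = s + l.foldl (· + ·) 0 := by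
  induction l with
  | nil => intro s; simp
  | cons x t ih => intro s; simp only [List.foldl_cons]; rw [ih (s + x), ih (0 + x)]; ring

-- sum of the segment xs[a:b] as a difference of prefix sums
theorem segSum (xs : List Int) (a b : Nat) (hab : a ≤ b) :
    ((xs.drop a).take (b - a)).foldl (· + ·) 0 = pvPref xs b - pvPref xs a := by
  unfold pvPref
  have : xs.take b = xs.take a ++ (xs.drop a).take (b - a) := by
    rw [← List.take_add]
    congr 1
    omega
  rw [this, List.foldl_append,
    sumShift ((xs.drop a).take (b - a)) ((xs.take a).foldl (· + ·) 0)]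
  ring

-- A's loop value is a left min-fold over the candidates
theorem pvAns_eq_foldl (upper : Int) (row0 row1 : List Int) (n : Int) (k : Nat) :
    pvAns upper row0 row1 n k = (pvCands upper row0 row1 0 k).foldl min (100001 * n) := by
  induction k with
  | zero => rfl
  | succ k ih =>
      have hr : List.range' 0 (k + 1) = List.range' 0 k ++ [k] := by
        simpa using List.range'_concat (s := 0) (n := k) (step := 1)
      simp only [pvAns, pvCands, hr, List.map_append, List.foldl_append, ih, List.map_cons,
        List.map_nil, List.foldl_cons, List.foldl_nil, pvCandN]

-- the spec of Source B's solve: a min-fold over the candidates of its split range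
theorem solveSpec (upper : Int) (row0 row1 : List Int) :
    ∀ (len : Nat), ∀ (lo fuel : Nat), 0 < len → len ≤ fuel → lo + len ≤ row0.length →
    pvSolve row0 row1 fuel (lo : Int) ((lo + len : Nat) : Int)
        (upper - pvPref row0 (lo + len)) (pvPref row1 lo)
      = (pvCands upper row0 row1 (lo + 1) (len - 1)).foldl min
          (pvCandN upper row0 row1 lo) := by
  intro len
  induction len using Nat.strong_induction_on with
  | _ len ih =>
      intro lo fuel hpos hfuel hle
      obtain ⟨f, rfl⟩ : ∃ f, fuel = f + 1 := ⟨fuel - 1, by omega⟩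
      rcases Nat.lt_or_ge len 2 with hsm | hbig
      · -- len = 1: the base case of solve
        interval_cases len
        rw [pvSolve]
        rw [if_pos (by push_cast; omega)]
        simp [pvCands, pvCandN]
      · -- len ≥ 2: the recursive case
        rw [pvSolve]
        rw [if_neg (by push_cast; omega)]
        set m := len / 2 with hm
        have hm1 : 0 < m := by omega
        have hm2 : m < len := by omega
        have hmid : PySem.Int.floordiv ((lo : Int) + ((lo + len : Nat) : Int)) 2
            = ((lo + m : Nat) : Int) := by
          rw [PySem.Int.floordiv_eq_ediv_of_pos (by norm_num : (0:Int) < 2)]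
          push_cast
          omega
        simp only [hmid]
        -- the two slice sums
        have hs0 : (PySem.List.slice row0 (some ((lo + m : Nat) : Int))
              (some ((lo + len : Nat) : Int))).foldl (· + ·) 0
            = pvPref row0 (lo + len) - pvPref row0 (lo + m) := by
          rw [PySem.List.slice_natCast]
          exact segSum row0 (lo + m) (lo + len) (by omega)
        have hs1 : (PySem.List.slice row1 (some ((lo : Nat) : Int))
              (some ((lo + m : Nat) : Int))).foldl (· + ·) 0
            = pvPref row1 (lo + m) - pvPref row1 lo := by
          rw [PySem.List.slice_natCast]
          exact segSum row1 lo (lo + m) (by omega)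
        rw [hs0, hs1]
        rw [show upper - pvPref row0 (lo + len)
              + (pvPref row0 (lo + len) - pvPref row0 (lo + m))
            = upper - pvPref row0 (lo + m) by ring]
        rw [show pvPref row1 lo + (pvPref row1 (lo + m) - pvPref row1 lo)
            = pvPref row1 (lo + m) by ring]
        -- the two recursive calls, by the induction hypothesis
        have hL := ih m hm2 lo f hm1 (by omega) (by omega)
        have hR := ih (len - m) (by omega) (lo + m) f (by omega) (by omega) (by omega)
        rw [show (lo + m) + (len - m) = lo + len by omega] at hR
        rw [hL, hR]
        -- recombine the two folds
        have hsplit : pvCands upper row0 row1 (lo + 1) (len - 1)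
            = pvCands upper row0 row1 (lo + 1) (m - 1)
              ++ pvCandN upper row0 row1 (lo + m)
                :: pvCands upper row0 row1 (lo + m + 1) (len - m - 1) := by
          unfold pvCands
          rw [← List.map_cons, ← List.map_append]
          congr 1
          have h2 : List.range' (lo + m) (len - m)
              = (lo + m) :: List.range' (lo + m + 1) (len - m - 1) := by
            conv_lhs => rw [show len - m = (len - m - 1) + 1 by omega]
            rw [List.range'_succ]
          have h3 := List.range'_append (s := lo + 1) (m := m - 1) (n := len - m) (step := 1)
          rw [show (lo + 1) + 1 * (m - 1) = lo + m by omega,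
              show (m - 1) + (len - m) = len - 1 by omega] at h3
          rw [← h3, h2]
        rw [hsplit, foldlMin_split]

-- ===== VERDICT (by name: the statement is the Claim_ definition above) =====
theorem gridGame2_spec : Claim_equal_gridGame2 := by
  intro grid _ hpre
  obtain ⟨hne, hsec⟩ := hpre
  obtain ⟨row0, rest, rfl⟩ : ∃ r t, grid = r :: t := by
    cases grid with
    | nil => exact absurd rfl hne
    | cons a t => exact ⟨a, t, rfl⟩
  have hrow0 : (PySem.List.pyGet? (row0 :: rest) 0).getD [] = row0 := by
    simp
  unfold Spec_gridGame2 gridGame2 gridGame2_alt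
  simp only [hrow0]
  by_cases hn : row0.length = 0
  · -- empty first row: A's loop is empty and B takes the n = 0 branch
    simp [hn, PySem.List.pyRange_one_eq_nil le_rfl]
  · -- nonempty first row: Pre_ supplies a second row of sufficient length
    have h2 : 2 ≤ (row0 :: rest).length := (hsec (by simpa using hn)).1
    have hlen' := (hsec (by simpa using hn)).2
    obtain ⟨row1, rest', rfl⟩ : ∃ r t, rest = r :: t := by
      cases rest with
      | nil => simp at h2
      | cons a t => exact ⟨a, t, rfl⟩
    have hlen : row0.length ≤ row1.length := by simpa using hlen'
    have hrow1 : (PySem.List.pyGet? (row0 :: row1 :: rest') 1).getD [] = row1 := by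
      rw [show (1 : Int) = ((1 : Nat) : Int) from rfl, PySem.List.pyGet?_natCast]
      simp
    have hne0 : ((row0.length : Int)) ≠ 0 := by exact_mod_cast hn
    rw [hrow1, if_neg hne0]
    set upper := row0.foldl (· + ·) 0 with hup
    rw [loopA upper row0 row1 (row0.length : Int) row0.length le_rfl hlen]
    have htot : pvPref row0 row0.length = upper := by
      simp [pvPref, hup]
    have hsolve := solveSpec upper row0 row1 row0.length 0 row0.length (by omega) (by omega) (by omega)
    simp only [Nat.zero_add, Nat.cast_zero] at hsolve
    rw [htot] at hsolve
    rw [show upper - upper = 0 by ring] at hsolve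
    rw [show pvPref row1 0 = 0 from rfl] at hsolve
    rw [show (((row0.length : Int)).toNat) = row0.length by omega]
    rw [hsolve, pvAns_eq_foldl]
    rw [show pvCands upper row0 row1 0 row0.length
        = pvCandN upper row0 row1 0 :: pvCands upper row0 row1 1 (row0.length - 1) by
      unfold pvCands
      rw [show row0.length = (row0.length - 1) + 1 by omega, List.range'_succ]
      simp]
    rw [List.foldl_cons, pullMin]
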